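-- pv_equiv track=rewrite | github.com/ElshadaiK/Competitive-Programming | language.py | solution
-- ===== SOURCE A (Python) =====
-- def solution(inp):
--     count = 0
--     vs = []
--     for i in range(len(inp)):
--         if inp[i] == "w":
--             count += 1
--         elif inp[i] == 'v':
--             if(vs != []):
--                 if(i-1 == vs[-1]):
--                     count += 1
--                     vs.pop()
--                 else:
--                     vs.append(i)
--             else:
--                 vs.append(i)
--     return count
-- ===== SOURCE B (Python) =====
-- def solution(inp):
--     count = 0
--     run = 0
--     for c in inp:
--         if c == 'v':
--             run += 1
--             if run == 2:
--                 count += 1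
--                 run = 0
--         else:
--             run = 0
--             if c == 'w':
--                 count += 1
--     return count
-- ===== Notes on version B (the rewrite author's own statement) =====
-- stated objective: simpler
-- what changed: Replaces the stack of indices of unmatched 'v's (with list append/pop and an index comparison against the stack top) by a single scalar run counter of consecutive 'v's that resets on any other character, counting a pair each time the run reaches 2.
import Mathlib
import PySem

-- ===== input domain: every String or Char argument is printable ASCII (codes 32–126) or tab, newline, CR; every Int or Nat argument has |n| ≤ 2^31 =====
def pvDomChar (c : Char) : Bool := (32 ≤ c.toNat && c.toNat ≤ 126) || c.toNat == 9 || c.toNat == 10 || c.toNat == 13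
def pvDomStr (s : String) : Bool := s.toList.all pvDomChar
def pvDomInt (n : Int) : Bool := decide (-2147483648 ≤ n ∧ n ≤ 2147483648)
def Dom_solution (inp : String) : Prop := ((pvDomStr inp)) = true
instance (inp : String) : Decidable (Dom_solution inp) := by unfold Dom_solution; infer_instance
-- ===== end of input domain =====

-- B replaces A's stack of indices of unmatched 'v's by a single run counter of
-- consecutive 'v's (objective: simpler); same O(n) cost, same return value.

-- ===== PORT A =====
-- A's loop body: state is (count, vs); inp[i] is always in range (i ∈ range(len(inp))),
-- so pyGetD's default is never read; vs[-1] is read only under the vs ≠ [] guard;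
-- vs.pop() on the guaranteed-nonempty vs is dropLast.
def solutionStepA (s : List Char) (st : Int × List Int) (i : Int) : Int × List Int :=
  let c := PySem.List.pyGetD s i ' '
  if c = 'w' then (st.1 + 1, st.2)
  else if c = 'v' then
    if st.2 ≠ [] then
      if i - 1 = PySem.List.pyGetD st.2 (-1) 0 then (st.1 + 1, st.2.dropLast)
      else (st.1, st.2 ++ [i])
    else (st.1, st.2 ++ [i])
  else st

def solution (inp : String) : Int :=
  ((PySem.List.pyRange 0 (PySem.Str.len inp) 1).foldl (solutionStepA inp.toList) (0, [])).1

-- ===== PORT B =====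
def solutionStepB (st : Int × Int) (c : Char) : Int × Int :=
  if c = 'v' then
    if st.2 + 1 = 2 then (st.1 + 1, 0) else (st.1, st.2 + 1)
  else
    if c = 'w' then (st.1 + 1, 0) else (st.1, 0)

def solution_alt (inp : String) : Int :=
  (inp.toList.foldl solutionStepB (0, 0)).1

-- ===== PRECONDITION & SPEC =====
def Spec_solution (inp : String) (out : Int) : Prop := out = solution_alt inp
instance (inp : String) (out : Int) : Decidable (Spec_solution inp out) := by unfold Spec_solution; infer_instance

-- ===== CLAIM (what is proved, stated in full; the proofs are below) =====
def Claim_equal_solution : Prop := ∀ (inp : String), Dom_solution inp → Spec_solution inp (solution inp)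

-- ===== LEMMAS AND PROOFS =====

-- A's step with the character passed directly (what the step does once xs[i] is resolved)
def pvStepA2 (st : Int × List Int) (i : Int) (c : Char) : Int × List Int :=
  if c = 'w' then (st.1 + 1, st.2)
  else if c = 'v' then
    if st.2 ≠ [] then
      if i - 1 = PySem.List.pyGetD st.2 (-1) 0 then (st.1 + 1, st.2.dropLast)
      else (st.1, st.2 ++ [i])
    else (st.1, st.2 ++ [i])
  else st

-- Invariant linking A's stack to B's run counter at next index s:
-- run is 0 or 1, run = 1 exactly when the stack top is the previous index,
-- and every stacked index is below s.
def pvInv (s : Int) (vs : List Int) (run : Int) : Prop :=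
  (run = 0 ∨ run = 1) ∧ (run = 1 ↔ vs.getLast? = some (s - 1)) ∧ (∀ j ∈ vs, j < s)

theorem pvInv_reset (s : Int) (vs : List Int) (hlt : ∀ j ∈ vs, j < s) :
    pvInv (s + 1) vs 0 := by
  refine ⟨Or.inl rfl, ⟨fun h => absurd h (by norm_num), fun h => ?_⟩,
    fun j hj => by have := hlt j hj; omega⟩
  exfalso
  have := hlt _ (List.mem_of_getLast? h); omega

theorem pvInv_push (s : Int) (vs : List Int) (hlt : ∀ j ∈ vs, j < s) :
    pvInv (s + 1) (vs ++ [s]) 1 := by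
  refine ⟨Or.inr rfl, ⟨fun _ => by simp, fun _ => rfl⟩, fun j hj => ?_⟩
  rcases List.mem_append.mp hj with h | h
  · have := hlt j h; omega
  · simp at h; omega

theorem pv_main (l : List Char) : ∀ (s cA : Int) (vs : List Int) (run : Int),
    pvInv s vs run →
    ((PySem.List.enumerate l s).foldl (fun st p => pvStepA2 st p.1 p.2) (cA, vs)).1
      = (l.foldl solutionStepB (cA, run)).1 := by
  induction l with
  | nil => intro s cA vs run _; simp [PySem.List.enumerate_nil]
  | cons c t ih =>
    intro s cA vs run hinv
    obtain ⟨h01, hiff, hlt⟩ := hinv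
    rw [PySem.List.enumerate_cons]
    simp only [List.foldl_cons]
    by_cases hw : c = 'w'
    · subst hw
      have hA : pvStepA2 (cA, vs) s 'w' = (cA + 1, vs) := by simp [pvStepA2]
      have hB : solutionStepB (cA, run) 'w' = (cA + 1, 0) := by simp [solutionStepB]
      rw [hA, hB]
      exact ih (s + 1) (cA + 1) vs 0 (pvInv_reset s vs hlt)
    · by_cases hv : c = 'v'
      · subst hv
        rcases h01 with hr0 | hr1
        · -- run = 0: no adjacent unmatched 'v'; A appends s, B sets run to 1
          subst hr0
          have hne : vs.getLast? ≠ some (s - 1) := fun h => by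
            have : (0 : Int) = 1 := hiff.mpr h
            norm_num at this
          have hA : pvStepA2 (cA, vs) s 'v' = (cA, vs ++ [s]) := by
            rcases eq_or_ne vs [] with hnil | hnn
            · subst hnil; simp [pvStepA2]
            · have hlast : PySem.List.pyGetD vs (-1) 0 = vs.getLast hnn :=
                PySem.List.pyGetD_neg_one vs 0 hnn
              have hcond : s - 1 ≠ PySem.List.pyGetD vs (-1) 0 := by
                rw [hlast]; intro h
                exact hne (by rw [List.getLast?_eq_some_getLast hnn, ← h])
              simp [pvStepA2, hnn, hcond]
          have hB : solutionStepB (cA, 0) 'v' = (cA, 1) := by simp [solutionStepB]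
          rw [hA, hB]
          exact ih (s + 1) cA (vs ++ [s]) 1 (pvInv_push s vs hlt)
        · -- run = 1: stack top is s-1; A counts and pops, B counts and resets
          subst hr1
          have hlast? : vs.getLast? = some (s - 1) := hiff.mp rfl
          have hnn : vs ≠ [] := by intro h; subst h; simp at hlast?
          have hlast : PySem.List.pyGetD vs (-1) 0 = s - 1 := by
            rw [PySem.List.pyGetD_neg_one vs 0 hnn]
            have h2 := List.getLast?_eq_some_getLast hnn
            rw [h2] at hlast?
            exact (Option.some.injEq _ _).mp hlast?
          have hA : pvStepA2 (cA, vs) s 'v' = (cA + 1, vs.dropLast) := by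
            simp [pvStepA2, hnn, hlast]
          have hB : solutionStepB (cA, 1) 'v' = (cA + 1, 0) := by simp [solutionStepB]
          rw [hA, hB]
          exact ih (s + 1) (cA + 1) vs.dropLast 0
            (pvInv_reset s vs.dropLast (fun j hj => hlt j (List.dropLast_subset _ hj)))
      · -- any other character: A leaves state unchanged, B resets run
        have hA : pvStepA2 (cA, vs) s c = (cA, vs) := by simp [pvStepA2, hw, hv]
        have hB : solutionStepB (cA, run) c = (cA, 0) := by simp [solutionStepB, hw, hv]
        rw [hA, hB]
        exact ih (s + 1) cA vs 0 (pvInv_reset s vs hlt)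

-- A's index loop over range(len(inp)) with inp[i] IS the fold over enumerate(inp)
theorem pv_solution_enum (inp : String) :
    solution inp
      = ((PySem.List.enumerate inp.toList 0).foldl
          (fun st p => pvStepA2 st p.1 p.2) (0, [])).1 := by
  rw [solution]
  rw [PySem.List.enumerate_eq_map_pyRange inp.toList ' ', List.foldl_map]
  rfl

-- ===== VERDICT (by name: the statement is the Claim_ definition above) =====
theorem solution_spec : Claim_equal_solution := by
  intro inp _
  unfold Spec_solution solution_alt
  rw [pv_solution_enum]
  exact pv_main inp.toList 0 0 [] 0 ⟨Or.inl rfl, by simp, by simp⟩
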